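-- pv_equiv track=rewrite | github.com/EricCogen/GauntletCI | src/GauntletCI.Corpus/GauntletCI_Labeler_App/services/fixture_service.py | _find_file_section
-- ===== SOURCE A (Python) =====
-- def _find_file_section(lines: list[str], file_path: str) -> int:
--     """Return index of the `diff --git` header whose path matches file_path, or -1."""
--     norm = file_path.replace("\\", "/").lstrip("/")
--     for i, line in enumerate(lines):
--         if line.startswith("diff --git ") and norm in line:
--             return i
--     # Looser match: just the filename
--     name = norm.rsplit("/", 1)[-1]
--     if name:
--         for i, line in enumerate(lines):
--             if line.startswith("diff --git ") and name in line:
--                 return i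
--     return -1
-- ===== SOURCE B (Python) =====
-- def _find_file_section(lines: list[str], file_path: str) -> int:
--     """Return index of the `diff --git` header whose path matches file_path, or -1."""
--     norm = file_path.replace("\\", "/").lstrip("/")
--     name = norm.rsplit("/", 1)[-1]
--     cand = None
--     for i, line in enumerate(lines):
--         if not line.startswith("diff --git "):
--             continue
--         if norm in line:
--             return i
--         if name and cand is None and name in line:
--             cand = i
--     return cand if cand is not None else -1
-- ===== Notes on version B (the rewrite author's own statement) =====
-- stated objective: faster
-- what changed: A's two full scans of lines (full-path pass, then filename-only pass) are replaced by one single pass that returns immediately on a full-path match and records the first filename-only candidate, returned after the loop if no full match was found.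
import Mathlib
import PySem

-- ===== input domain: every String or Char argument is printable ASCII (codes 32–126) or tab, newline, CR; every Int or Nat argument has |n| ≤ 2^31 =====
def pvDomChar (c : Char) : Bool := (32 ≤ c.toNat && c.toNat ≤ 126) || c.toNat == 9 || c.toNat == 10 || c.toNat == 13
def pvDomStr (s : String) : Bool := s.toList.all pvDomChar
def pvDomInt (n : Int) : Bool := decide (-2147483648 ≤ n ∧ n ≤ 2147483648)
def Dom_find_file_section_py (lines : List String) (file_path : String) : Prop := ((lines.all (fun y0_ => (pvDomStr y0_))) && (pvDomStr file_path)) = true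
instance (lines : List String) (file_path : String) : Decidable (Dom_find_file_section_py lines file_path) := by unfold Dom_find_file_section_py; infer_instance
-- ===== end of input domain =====

-- B replaces A's two full scans of `lines` by one pass that returns on a full-path match and
-- records the first filename-only candidate (objective: faster by a constant factor, single pass).

-- Shared string helpers (both Pythons compute norm/name the same way):
-- file_path.lstrip("/") with the single strip char '/': exact (dropWhile of '/').
def pvLstripSlash (s : String) : String := String.mk (s.toList.dropWhile (fun c => c = '/'))
-- norm.rsplit("/", 1)[-1] for the single-char separator "/": the suffix after the LAST '/',
-- or the whole string if '/' is absent — exact for sep = "/" and maxsplit 1.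
def pvAfterLastSlash (s : String) : String := String.mk ((s.toList.reverse.takeWhile (fun c => c ≠ '/')).reverse)

-- ===== PORT A =====
-- A's `for i, line in enumerate(lines): if line.startswith("diff --git ") and sub in line: return i`
def pvLoopA (sub : String) : List String → Int → Option Int
  | [], _ => none
  | l :: ls, i =>
    if PySem.Str.startswith l "diff --git " && PySem.Str.isIn sub l then some i
    else pvLoopA sub ls (i + 1)

def find_file_section_py (lines : List String) (file_path : String) : Int :=
  let norm := pvLstripSlash (PySem.Str.replace file_path "\\" "/")
  match pvLoopA norm lines 0 with
  | some i => i
  | none =>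
    let name := pvAfterLastSlash norm
    if name ≠ "" then
      match pvLoopA name lines 0 with
      | some i => i
      | none => -1
    else -1

-- ===== PORT B =====
-- B's single pass: return i on a full-path match, remember the first filename-only match.
def pvLoopB (norm name : String) : List String → Int → Option Int → Int
  | [], _, cand => cand.getD (-1)
  | l :: ls, i, cand =>
    if PySem.Str.startswith l "diff --git " then
      if PySem.Str.isIn norm l then i
      else
        pvLoopB norm name ls (i + 1)
          (if (name != "") && cand.isNone && PySem.Str.isIn name l then some i else cand)
    else pvLoopB norm name ls (i + 1) cand

def find_file_section_py_alt (lines : List String) (file_path : String) : Int :=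
  let norm := pvLstripSlash (PySem.Str.replace file_path "\\" "/")
  let name := pvAfterLastSlash norm
  pvLoopB norm name lines 0 none

-- ===== PRECONDITION & SPEC =====
def Spec_find_file_section_py (lines : List String) (file_path : String) (out : Int) : Prop := out = find_file_section_py_alt lines file_path
instance (lines : List String) (file_path : String) (out : Int) : Decidable (Spec_find_file_section_py lines file_path out) := by unfold Spec_find_file_section_py; infer_instance

-- ===== CLAIM (what is proved, stated in full; the proofs are below) =====
def Claim_equal_find_file_section_py : Prop := ∀ (lines : List String) (file_path : String), Dom_find_file_section_py lines file_path → Spec_find_file_section_py lines file_path (find_file_section_py lines file_path)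

-- ===== LEMMAS AND PROOFS =====

-- What B's loop computes, phrased with A's loops: first full match wins; otherwise the
-- incoming candidate; otherwise (name nonempty) the first filename match; otherwise -1.
theorem pvLoopB_eq (norm name : String) (ls : List String) (i : Int) (cand : Option Int) :
    pvLoopB norm name ls i cand =
      match pvLoopA norm ls i with
      | some j => j
      | none =>
        match cand with
        | some c => c
        | none =>
          if name ≠ "" then
            match pvLoopA name ls i with
            | some j => j
            | none => -1
          else -1 := by
  induction ls generalizing i cand with
  | nil => cases cand <;> simp [pvLoopB, pvLoopA, Option.getD]
  | cons l ls ih =>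
    by_cases hs : PySem.Str.startswith l "diff --git " = true <;>
    by_cases hn : PySem.Str.isIn norm l = true <;>
    by_cases hname : name = "" <;>
    by_cases hin : PySem.Str.isIn name l = true <;>
    simp only [PySem.Str.startswith_eq, PySem.Str.isIn_eq,
      (by decide : "diff --git ".toList = ['d','i','f','f',' ','-','-','g','i','t',' '])] at hs hn hin <;>
    cases cand <;>
    first
      | (subst hname; simp [pvLoopB, pvLoopA, hs, hn, hin, ih])
      | simp [pvLoopB, pvLoopA, hs, hn, hname, hin, ih]

-- ===== VERDICT (by name: the statement is the Claim_ definition above) =====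
theorem find_file_section_py_spec : Claim_equal_find_file_section_py := by
  intro lines file_path _
  unfold Spec_find_file_section_py find_file_section_py find_file_section_py_alt
  rw [pvLoopB_eq]
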